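-- pv_equiv track=rewrite | github.com/niamhtelnyx/quinn-daily-metrics | scripts/session-consolidation-detector.py | _calculate_fragmentation_score
-- ===== SOURCE A (Python) =====
-- def _calculate_fragmentation_score(issues: list) -> float:
--     """Calculate overall fragmentation score (0-10, higher = more fragmented)"""
--     score = 0
--
--     for issue in issues:
--         if issue['severity'] == 'HIGH':
--             score += 3
--         elif issue['severity'] == 'MEDIUM':
--             score += 2
--         else:
--             score += 1
--
--     # Cap at 10
--     return min(score, 10)
-- ===== SOURCE B (Python) =====
-- def _calculate_fragmentation_score(issues: list) -> float:
--     """Calculate overall fragmentation score (0-10, higher = more fragmented)"""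
--     severities = [issue['severity'] for issue in issues]
--     score = len(severities) + 2 * severities.count('HIGH') + severities.count('MEDIUM')
--     return min(score, 10)
-- ===== Notes on version B (the rewrite author's own statement) =====
-- stated objective: alternative
-- what changed: Replaces the branching accumulation loop with a tabulate-then-arithmetic form: collect the severity values once, then compute len + 2*count('HIGH') + count('MEDIUM') in closed form and cap at 10.
import Mathlib
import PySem

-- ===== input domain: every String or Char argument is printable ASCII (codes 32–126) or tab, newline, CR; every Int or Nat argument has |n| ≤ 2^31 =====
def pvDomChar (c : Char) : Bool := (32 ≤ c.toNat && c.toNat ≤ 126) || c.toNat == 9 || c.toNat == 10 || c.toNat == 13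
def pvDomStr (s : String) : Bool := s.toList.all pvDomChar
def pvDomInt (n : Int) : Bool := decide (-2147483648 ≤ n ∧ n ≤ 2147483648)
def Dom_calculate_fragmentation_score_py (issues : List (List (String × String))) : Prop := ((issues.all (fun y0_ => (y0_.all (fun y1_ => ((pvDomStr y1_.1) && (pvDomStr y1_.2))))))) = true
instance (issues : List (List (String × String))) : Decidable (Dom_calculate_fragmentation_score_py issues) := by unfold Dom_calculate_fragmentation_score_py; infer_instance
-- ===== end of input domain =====

-- B replaces A's branching accumulation loop by collecting the severities once and
-- computing the score by closed-form arithmetic from two counts (alternative decomposition, same cost).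

-- ===== PORT A =====
-- issue['severity'] : first-match lookup; Pre_ guarantees the key is present, so the
-- "" default of getD is never the value used on admitted inputs.
def calculate_fragmentation_score_py (issues : List (List (String × String))) : Int :=
  let score := issues.foldl (fun score issue =>
    let s := (PySem.Dict.mk issue).getD "severity" ""
    if s = "HIGH" then score + 3
    else if s = "MEDIUM" then score + 2
    else score + 1) 0
  min score 10

-- ===== PORT B =====
def calculate_fragmentation_score_py_alt (issues : List (List (String × String))) : Int :=
  let severities := issues.map (fun issue => (PySem.Dict.mk issue).getD "severity" "")
  let score := (severities.length : Int) + 2 * PySem.List.count severities "HIGH" + PySem.List.count severities "MEDIUM"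
  min score 10

-- ===== PRECONDITION & SPEC =====
-- Pre_ excludes exactly the inputs where some issue lacks the key 'severity', on which A raises KeyError.
def Pre_calculate_fragmentation_score_py (issues : List (List (String × String))) : Prop :=
  (issues.all (fun issue => issue.any (fun p => p.1 == "severity"))) = true
instance (issues : List (List (String × String))) : Decidable (Pre_calculate_fragmentation_score_py issues) := by unfold Pre_calculate_fragmentation_score_py; infer_instance
def pvWitness_calculate_fragmentation_score_py : (List (List (String × String))) :=
  [[("severity", "HIGH")], [("severity", "LOW"), ("id", "7")]]

def Spec_calculate_fragmentation_score_py (issues : List (List (String × String))) (out : Int) : Prop := out = calculate_fragmentation_score_py_alt issues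
instance (issues : List (List (String × String))) (out : Int) : Decidable (Spec_calculate_fragmentation_score_py issues out) := by unfold Spec_calculate_fragmentation_score_py; infer_instance

-- ===== CLAIM (what is proved, stated in full; the proofs are below) =====
def Claim_equal_calculate_fragmentation_score_py : Prop := ∀ (issues : List (List (String × String))), Dom_calculate_fragmentation_score_py issues → Pre_calculate_fragmentation_score_py issues → Spec_calculate_fragmentation_score_py issues (calculate_fragmentation_score_py issues)

-- ===== LEMMAS AND PROOFS =====
theorem frag_foldl_eq (issues : List (List (String × String))) (a : Int) :
    issues.foldl (fun score issue =>
      let s := (PySem.Dict.mk issue).getD "severity" ""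
      if s = "HIGH" then score + 3
      else if s = "MEDIUM" then score + 2
      else score + 1) a
    = a + (issues.length : Int)
        + 2 * ((issues.map (fun issue => (PySem.Dict.mk issue).getD "severity" "")).count "HIGH" : Int)
        + ((issues.map (fun issue => (PySem.Dict.mk issue).getD "severity" "")).count "MEDIUM" : Int) := by
  induction issues generalizing a with
  | nil => simp
  | cons x xs ih =>
    simp only [List.foldl_cons, List.map_cons, List.count_cons, ih]
    by_cases h1 : (PySem.Dict.mk x).getD "severity" "" = "HIGH" <;>
      by_cases h2 : (PySem.Dict.mk x).getD "severity" "" = "MEDIUM" <;>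
      simp [h1, h2] <;> ring

-- ===== VERDICT (by name: the statement is the Claim_ definition above) =====
theorem calculate_fragmentation_score_py_spec : Claim_equal_calculate_fragmentation_score_py := by
  intro issues _ _
  unfold Spec_calculate_fragmentation_score_py calculate_fragmentation_score_py calculate_fragmentation_score_py_alt
  simp only [frag_foldl_eq, PySem.List.count_eq, List.length_map]
  ring_nf
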